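-- pv_equiv track=rewrite | github.com/SSteel2/AdventOfCode | 2022/23/23.py | _calculate_empty_ground
-- ===== SOURCE A (Python) =====
-- import math
--
-- def _calculate_empty_ground(elves):
-- 	min_x, min_y, max_x, max_y = math.inf, math.inf, -math.inf, -math.inf
-- 	total_elves = len(elves)
-- 	for i in elves:
-- 		if i[0] < min_y:
-- 			min_y = i[0]
-- 		if i[0] > max_y:
-- 			max_y = i[0]
-- 		if i[1] < min_x:
-- 			min_x = i[1]
-- 		if i[1] > max_x:
-- 			max_x = i[1]
-- 	return (max_x - min_x + 1) * (max_y - min_y + 1) - total_elves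
-- ===== SOURCE B (Python) =====
-- def _calculate_empty_ground(elves):
-- 	ys = sorted(e[0] for e in elves)
-- 	xs = sorted(e[1] for e in elves)
-- 	return (xs[-1] - xs[0] + 1) * (ys[-1] - ys[0] + 1) - len(elves)
-- ===== Notes on version B (the rewrite author's own statement) =====
-- stated objective: alternative
-- what changed: Replaces A's single pass with four sentinel (math.inf) accumulators by a sort-then-pick-endpoints algorithm: sort each coordinate list and read the extremes off the sorted ends (xs[0]/xs[-1], ys[0]/ys[-1]); the empty list, where A returns float inf, is excluded by Pre_ (B raises IndexError there).
-- outside the precondition, e.g. on _calculate_empty_ground(set()): A returns inf, B raises IndexError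
import Mathlib
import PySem

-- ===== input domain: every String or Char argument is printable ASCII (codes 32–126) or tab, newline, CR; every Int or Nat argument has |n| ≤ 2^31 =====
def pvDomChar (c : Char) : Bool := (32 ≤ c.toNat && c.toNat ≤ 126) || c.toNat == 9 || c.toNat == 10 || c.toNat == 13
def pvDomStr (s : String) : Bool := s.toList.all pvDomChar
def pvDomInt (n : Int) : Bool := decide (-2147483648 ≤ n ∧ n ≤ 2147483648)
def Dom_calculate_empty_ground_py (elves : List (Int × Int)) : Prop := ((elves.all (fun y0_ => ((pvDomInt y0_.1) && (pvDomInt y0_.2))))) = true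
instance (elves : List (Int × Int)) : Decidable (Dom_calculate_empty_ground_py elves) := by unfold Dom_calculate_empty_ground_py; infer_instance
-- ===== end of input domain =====

-- B replaces A's single-pass sentinel (math.inf) min/max loop by sorting each coordinate list and reading
-- the extremes off the sorted ends (alternative algorithm; O(n log n) vs O(n)).
-- Pre_ excludes the empty list: there A returns the float inf (not an int) and B raises IndexError.


-- ===== PORT A =====
-- A's loop state: (min_x, min_y, max_x, max_y), with none playing math.inf / -math.inf.
def pvStepA (s : Option Int × Option Int × Option Int × Option Int) (i : Int × Int) :
    Option Int × Option Int × Option Int × Option Int :=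
  let (min_x, min_y, max_x, max_y) := s
  let min_y := if (match min_y with | none => true | some m => i.1 < m) then some i.1 else min_y
  let max_y := if (match max_y with | none => true | some m => i.1 > m) then some i.1 else max_y
  let min_x := if (match min_x with | none => true | some m => i.2 < m) then some i.2 else min_x
  let max_x := if (match max_x with | none => true | some m => i.2 > m) then some i.2 else max_x
  (min_x, min_y, max_x, max_y)

def calculate_empty_ground_py (elves : List (Int × Int)) : Int :=
  let total_elves : Int := elves.length
  match elves.foldl pvStepA (none, none, none, none) with
  | (some min_x, some min_y, some max_x, some max_y) =>
      (max_x - min_x + 1) * (max_y - min_y + 1) - total_elves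
  | _ => 0  -- empty list: Python A returns the float inf, not an Int; outside Pre_

-- ===== PORT B =====
def calculate_empty_ground_py_alt (elves : List (Int × Int)) : Int :=
  let ys := PySem.List.sorted (elves.map (fun e => e.1)) (fun y => y) false
  let xs := PySem.List.sorted (elves.map (fun e => e.2)) (fun x => x) false
  match PySem.List.pyGet? xs (-1) with
  | none => 0  -- empty list: Python B raises IndexError; outside Pre_
  | some mxx =>
    match PySem.List.pyGet? xs 0 with
    | none => 0
    | some mnx =>
      match PySem.List.pyGet? ys (-1) with
      | none => 0
      | some mxy =>
        match PySem.List.pyGet? ys 0 with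
        | none => 0
        | some mny => (mxx - mnx + 1) * (mxy - mny + 1) - (elves.length : Int)

-- ===== PRECONDITION & SPEC =====
-- Pre_ excludes only the empty list, where A returns float inf (not an int) and B raises IndexError.
def Pre_calculate_empty_ground_py (elves : List (Int × Int)) : Prop := elves ≠ []
instance (elves : List (Int × Int)) : Decidable (Pre_calculate_empty_ground_py elves) := by unfold Pre_calculate_empty_ground_py; infer_instance
def pvWitness_calculate_empty_ground_py : (List (Int × Int)) := [(2, 3), (0, -1)]
def Spec_calculate_empty_ground_py (elves : List (Int × Int)) (out : Int) : Prop := out = calculate_empty_ground_py_alt elves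
instance (elves : List (Int × Int)) (out : Int) : Decidable (Spec_calculate_empty_ground_py elves out) := by unfold Spec_calculate_empty_ground_py; infer_instance

-- ===== CLAIM (what is proved, stated in full; the proofs are below) =====
def Claim_equal_calculate_empty_ground_py : Prop := ∀ (elves : List (Int × Int)), Dom_calculate_empty_ground_py elves → Pre_calculate_empty_ground_py elves → Spec_calculate_empty_ground_py elves (calculate_empty_ground_py elves)

-- ===== LEMMAS AND PROOFS =====

theorem pvOptMin (m v : Int) : (if decide (v < m) = true then some v else some m) = some (min m v) := by
  by_cases h : v < m
  · simp [h, min_eq_right (le_of_lt h)]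
  · simp [h, min_eq_left (not_lt.1 h)]

theorem pvOptMax (m v : Int) : (if decide (v > m) = true then some v else some m) = some (max m v) := by
  by_cases h : v > m
  · simp [h, max_eq_right (le_of_lt h)]
  · simp [h, max_eq_left (not_lt.1 h)]

theorem pvFoldA_some (t : List (Int × Int)) (a b c d : Int) :
    t.foldl pvStepA (some a, some b, some c, some d) =
      (some (t.foldl (fun m i => min m i.2) a),
       some (t.foldl (fun m i => min m i.1) b),
       some (t.foldl (fun m i => max m i.2) c),
       some (t.foldl (fun m i => max m i.1) d)) := by
  induction t generalizing a b c d with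
  | nil => simp
  | cons h t ih =>
      simp only [List.foldl_cons, pvStepA]
      rw [pvOptMin, pvOptMin, pvOptMax, pvOptMax, ih]

theorem pvFoldMin_le_init (t : List Int) (a : Int) : t.foldl min a ≤ a := by
  induction t generalizing a with
  | nil => simp
  | cons h t ih => exact le_trans (ih (min a h)) (min_le_left _ _)

theorem pvFoldMax_ge_init (t : List Int) (a : Int) : a ≤ t.foldl max a := by
  induction t generalizing a with
  | nil => simp
  | cons h t ih => exact le_trans (le_max_left _ _) (ih (max a h))

theorem pvFoldMin_mem (t : List Int) (a : Int) : t.foldl min a ∈ a :: t := by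
  induction t generalizing a with
  | nil => simp
  | cons h t ih =>
      simp only [List.foldl_cons]
      have := ih (min a h)
      rcases List.mem_cons.1 this with h1 | h1
      · rcases min_choice a h with h2 | h2 <;> (rw [h2] at h1 ⊢; simp [h1])
      · simp [h1]

theorem pvFoldMax_mem (t : List Int) (a : Int) : t.foldl max a ∈ a :: t := by
  induction t generalizing a with
  | nil => simp
  | cons h t ih =>
      simp only [List.foldl_cons]
      have := ih (max a h)
      rcases List.mem_cons.1 this with h1 | h1
      · rcases max_choice a h with h2 | h2 <;> (rw [h2] at h1 ⊢; simp [h1])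
      · simp [h1]

theorem pvFoldMin_le (t : List Int) (a x : Int) (hx : x ∈ a :: t) : t.foldl min a ≤ x := by
  induction t generalizing a with
  | nil => simp at hx; simp [hx]
  | cons h t ih =>
      simp only [List.foldl_cons]
      rcases List.mem_cons.1 hx with h1 | h1
      · exact le_trans (pvFoldMin_le_init t (min a h)) (h1 ▸ min_le_left a h)
      · rcases List.mem_cons.1 h1 with h2 | h2
        · exact le_trans (pvFoldMin_le_init t (min a h)) (h2 ▸ min_le_right a h)
        · exact ih (min a h) (List.mem_cons_of_mem _ h2)

theorem pvFoldMax_ge (t : List Int) (a x : Int) (hx : x ∈ a :: t) : x ≤ t.foldl max a := by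
  induction t generalizing a with
  | nil => simp at hx; simp [hx]
  | cons h t ih =>
      simp only [List.foldl_cons]
      rcases List.mem_cons.1 hx with h1 | h1
      · exact le_trans (h1 ▸ le_max_left a h) (pvFoldMax_ge_init t (max a h))
      · rcases List.mem_cons.1 h1 with h2 | h2
        · exact le_trans (h2 ▸ le_max_right a h) (pvFoldMax_ge_init t (max a h))
        · exact ih (max a h) (List.mem_cons_of_mem _ h2)

theorem pvPairwise_getLast (l : List Int) (hp : l.Pairwise (fun a b => a ≤ b)) :
    ∀ x ∈ l, ∃ L, l.getLast? = some L ∧ x ≤ L := by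
  induction l with
  | nil => intro x hx; simp at hx
  | cons h t ih =>
      intro x hx
      rcases List.pairwise_cons.1 hp with ⟨hle, hpt⟩
      cases t with
      | nil =>
          simp at hx
          exact ⟨h, by simp, le_of_eq hx⟩
      | cons b t' =>
          rcases List.mem_cons.1 hx with h1 | h1
          · rcases ih hpt b (by simp) with ⟨L, hL, hbL⟩
            exact ⟨L, by simpa using hL, h1 ▸ le_trans (hle b (by simp)) hbL⟩
          · rcases ih hpt x h1 with ⟨L, hL, hxL⟩
            exact ⟨L, by simpa using hL, hxL⟩

theorem pvSorted_ends (a : Int) (t : List Int) :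
    (PySem.List.sorted (a :: t) (fun x => x) false).head? = some (t.foldl min a) ∧
    (PySem.List.sorted (a :: t) (fun x => x) false).getLast? = some (t.foldl max a) := by
  set s := PySem.List.sorted (a :: t) (fun x => x) false with hs
  have hperm : s.Perm (a :: t) := PySem.List.sorted_perm _ _ _
  have hne : s ≠ [] := by
    intro h; have := hperm.length_eq; simp [h] at this
  obtain ⟨m, r, hmr⟩ := List.exists_cons_of_ne_nil hne
  have hmem_iff : ∀ x, x ∈ s ↔ x ∈ a :: t := fun x => hperm.mem_iff
  constructor
  · have hmlo : ∀ y ∈ a :: t, m ≤ y := by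
      intro y hy
      have := PySem.List.key_head_sorted_le (xs := a :: t) (key := fun x => x) (m := m) (t := r) (hs ▸ hmr) y hy
      simpa using this
    have hm_mem : m ∈ a :: t := (hmem_iff m).1 (by simp [hmr])
    have h1 : t.foldl min a ≤ m := pvFoldMin_le t a m hm_mem
    have h2 : m ≤ t.foldl min a := hmlo _ (pvFoldMin_mem t a)
    rw [hmr]
    simp [le_antisymm h1 h2]
  · have hpw : s.Pairwise (fun x y => x ≤ y) := by
      have := PySem.List.sorted_pairwise (xs := a :: t) (key := fun x => x)
      exact this
    rcases pvPairwise_getLast s hpw (t.foldl max a) ((hmem_iff _).2 (pvFoldMax_mem t a)) with ⟨L, hL, hFL⟩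
    have hL_mem : L ∈ a :: t := (hmem_iff L).1 (List.mem_of_getLast? hL)
    have h1 : L ≤ t.foldl max a := pvFoldMax_ge t a L hL_mem
    rw [hL, le_antisymm h1 hFL]

theorem calculate_empty_ground_py_spec : Claim_equal_calculate_empty_ground_py := by
  intro elves _ hpre
  unfold Spec_calculate_empty_ground_py
  cases elves with
  | nil => exact absurd rfl hpre
  | cons y t =>
      unfold calculate_empty_ground_py calculate_empty_ground_py_alt
      simp only [List.foldl_cons, List.map_cons]
      have hinit : pvStepA (none, none, none, none) y = (some y.2, some y.1, some y.2, some y.1) := by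
        simp [pvStepA]
      rw [hinit, pvFoldA_some]
      obtain ⟨hy0, hyL⟩ := pvSorted_ends y.1 (t.map (fun e => e.1))
      obtain ⟨hx0, hxL⟩ := pvSorted_ends y.2 (t.map (fun e => e.2))
      rw [PySem.List.pyGet?_neg_one, PySem.List.pyGet?_zero, PySem.List.pyGet?_neg_one, PySem.List.pyGet?_zero,
        ← List.head?_eq_getElem?, ← List.head?_eq_getElem?, hy0, hyL, hx0, hxL, List.foldl_map, List.foldl_map,
        List.foldl_map, List.foldl_map]
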